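-- pv_equiv track=rewrite | github.com/nirothegreat/woolie-shopper | smart_shopping_list.py | _apply_substitutions
-- ===== SOURCE A (Python) =====
-- from typing import List, Dict
--
-- def _apply_substitutions(ingredients: List[Dict], substitutions: List[Dict]) -> List[Dict]:
--     """Apply ingredient substitutions"""
--
--     if not substitutions:
--         return ingredients
--
--     # Build substitution map
--     sub_map = {}
--     for sub in substitutions:
--         original = sub.get('original_ingredient', '').lower()
--         replacement = sub.get('replacement', '')
--         if original and replacement:
--             sub_map[original] = replacement
--
--     # Apply substitutions
--     result = []
--     for item in ingredients:
--         name = item.get('name', item.get('ingredient_name', '')).lower()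
--
--         if name in sub_map:
--             item_copy = item.copy()
--             item_copy['name'] = sub_map[name]
--             item_copy['notes'] = item_copy.get('notes', '') + f' (Substituted from {name})'
--             result.append(item_copy)
--         else:
--             result.append(item)
--
--     return result
-- ===== SOURCE B (Python) =====
-- def _apply_substitutions(ingredients, substitutions):
--     """Apply ingredient substitutions (substitution-major sweep: outer loop over
--     substitutions paints a per-ingredient replacement array; later substitutions
--     overwrite earlier ones, then one final pass builds the result)."""
--     if not substitutions:
--         return ingredients
--
--     names = [item.get('name', item.get('ingredient_name', '')).lower()
--              for item in ingredients]
--     repl = [None] * len(ingredients)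
--     for sub in substitutions:
--         o = sub.get('original_ingredient', '').lower()
--         r = sub.get('replacement', '')
--         if o and r:
--             for i, nm in enumerate(names):
--                 if nm == o:
--                     repl[i] = r
--
--     out = []
--     for item, nm, r in zip(ingredients, names, repl):
--         if r is None:
--             out.append(item)
--         else:
--             c = item.copy()
--             c['name'] = r
--             c['notes'] = c.get('notes', '') + f' (Substituted from {nm})'
--             out.append(c)
--     return out
-- ===== Notes on version B (the rewrite author's own statement) =====
-- stated objective: alternative
-- what changed: Inverts the loop nesting: instead of building a substitution dict and mapping each ingredient through a lookup, B does a substitution-major sweep that paints a per-ingredient replacement array (later substitutions overwrite earlier, matching dict overwrite), then a final pass materialises the result.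
import Mathlib
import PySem

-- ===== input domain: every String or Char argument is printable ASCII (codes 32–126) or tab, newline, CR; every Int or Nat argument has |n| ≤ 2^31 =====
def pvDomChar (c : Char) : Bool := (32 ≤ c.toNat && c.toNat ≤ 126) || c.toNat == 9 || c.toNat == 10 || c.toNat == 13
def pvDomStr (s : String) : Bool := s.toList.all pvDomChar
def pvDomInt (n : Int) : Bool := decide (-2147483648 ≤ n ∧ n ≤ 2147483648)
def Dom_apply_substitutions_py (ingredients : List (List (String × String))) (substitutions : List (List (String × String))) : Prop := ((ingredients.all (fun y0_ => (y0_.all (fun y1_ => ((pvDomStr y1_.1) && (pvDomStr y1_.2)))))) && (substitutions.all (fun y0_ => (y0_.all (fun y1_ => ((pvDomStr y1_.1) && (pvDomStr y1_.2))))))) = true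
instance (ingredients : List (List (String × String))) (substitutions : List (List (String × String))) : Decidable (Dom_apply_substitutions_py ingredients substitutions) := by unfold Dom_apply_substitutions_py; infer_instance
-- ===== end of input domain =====

-- B inverts A's loop nesting: a substitution-major sweep paints a per-ingredient replacement array (later substitutions overwrite), instead of a dict build + per-ingredient lookup (alternative decomposition, same results).
-- ===== PORT A =====
-- shared item helpers (name extraction and the copy/update of a matched item)
def pvItemName (item : List (String × String)) : String :=
  PySem.Str.lower ((PySem.Dict.mk item).getD "name" ((PySem.Dict.mk item).getD "ingredient_name" ""))

def pvApplyItem (item : List (String × String)) (name : String) (r : String) : List (String × String) :=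
  let c := (PySem.Dict.mk item).insert "name" r
  let c := c.insert "notes" (c.getD "notes" "" ++ " (Substituted from " ++ name ++ ")")
  c.items

-- A: one loop builds sub_map, a second maps ingredients through a lookup in it
def pvSubStep (d : PySem.Dict String String) (sub : List (String × String)) : PySem.Dict String String :=
  let original := PySem.Str.lower ((PySem.Dict.mk sub).getD "original_ingredient" "")
  let replacement := (PySem.Dict.mk sub).getD "replacement" ""
  if original != "" && replacement != "" then d.insert original replacement else d

def apply_substitutions_py (ingredients : List (List (String × String))) (substitutions : List (List (String × String))) : List (List (String × String)) :=
  if substitutions.isEmpty then ingredients else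
  let subMap := substitutions.foldl pvSubStep PySem.Dict.empty
  ingredients.map (fun item =>
    let name := pvItemName item
    match subMap.get? name with
    | some r => pvApplyItem item name r
    | none => item)

-- ===== PORT B =====
-- B: substitution-major sweep over a replacement array, then a final zip pass
def pvSweep (names : List String) (repl : List (Option String)) (sub : List (String × String)) : List (Option String) :=
  let o := PySem.Str.lower ((PySem.Dict.mk sub).getD "original_ingredient" "")
  let r := (PySem.Dict.mk sub).getD "replacement" ""
  if o != "" && r != "" then
    (names.zip repl).map (fun p => if p.1 == o then some r else p.2)
  else repl

def apply_substitutions_py_alt (ingredients : List (List (String × String))) (substitutions : List (List (String × String))) : List (List (String × String)) :=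
  if substitutions.isEmpty then ingredients else
  let names := ingredients.map pvItemName
  let repl := substitutions.foldl (pvSweep names) (List.replicate ingredients.length none)
  (ingredients.zip (names.zip repl)).map (fun q =>
    match q.2.2 with
    | none => q.1
    | some r => pvApplyItem q.1 q.2.1 r)

-- ===== PRECONDITION & SPEC =====
def Spec_apply_substitutions_py (ingredients : List (List (String × String))) (substitutions : List (List (String × String))) (out : List (List (String × String))) : Prop := out = apply_substitutions_py_alt ingredients substitutions
instance (ingredients : List (List (String × String))) (substitutions : List (List (String × String))) (out : List (List (String × String))) : Decidable (Spec_apply_substitutions_py ingredients substitutions out) := by unfold Spec_apply_substitutions_py; infer_instance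

-- ===== CLAIM (what is proved, stated in full; the proofs are below) =====
def Claim_equal_apply_substitutions_py : Prop := ∀ (ingredients : List (List (String × String))) (substitutions : List (List (String × String))), Dom_apply_substitutions_py ingredients substitutions → Spec_apply_substitutions_py ingredients substitutions (apply_substitutions_py ingredients substitutions)

-- ===== LEMMAS AND PROOFS =====
-- the "last truthy match" accumulator both programs realise
def pvLastStep (name : String) (acc : Option String) (sub : List (String × String)) : Option String :=
  let o := PySem.Str.lower ((PySem.Dict.mk sub).getD "original_ingredient" "")
  let r := (PySem.Dict.mk sub).getD "replacement" ""
  if o != "" && r != "" && o == name then some r else acc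

-- A's sub_map lookup equals the last-match fold
theorem foldl_subStep_get? (subs : List (List (String × String))) (d : PySem.Dict String String) (name : String) :
    (subs.foldl pvSubStep d).get? name = subs.foldl (pvLastStep name) (d.get? name) := by
  induction subs generalizing d with
  | nil => rfl
  | cons sub rest ih =>
    simp only [List.foldl_cons]
    rw [ih]
    congr 1
    simp only [pvSubStep, pvLastStep]
    by_cases ho : PySem.Str.lower ((PySem.Dict.mk sub).getD "original_ingredient" "") != ""
    · by_cases hr : (PySem.Dict.mk sub).getD "replacement" "" != ""
      · simp only [ho, hr, Bool.true_and, Bool.and_true]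
        by_cases he : PySem.Str.lower ((PySem.Dict.mk sub).getD "original_ingredient" "") = name
        · subst he
          simp [PySem.Dict.get?_insert_self]
        · have : (PySem.Str.lower ((PySem.Dict.mk sub).getD "original_ingredient" "") == name) = false := by
            simp [he]
          simp [this, PySem.Dict.get?_insert_of_ne _ _ (fun h => he h.symm)]
      · simp at hr
        simp [hr]
    · simp at ho
      simp [ho]

-- pvSweep preserves length of a repl array of the names' length
theorem pvSweep_length (names : List String) (repl : List (Option String)) (sub : List (String × String))
    (h : repl.length = names.length) : (pvSweep names repl sub).length = names.length := by
  by_cases hc : ((PySem.Str.lower ((PySem.Dict.mk sub).getD "original_ingredient" "") != "") && ((PySem.Dict.mk sub).getD "replacement" "" != "")) = true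
  · simp [pvSweep, hc, h]
  · simp only [Bool.not_eq_true] at hc
    simp [pvSweep, hc, h]

theorem foldl_pvSweep_length (subs : List (List (String × String))) (names : List String) (repl : List (Option String))
    (h : repl.length = names.length) : (subs.foldl (pvSweep names) repl).length = names.length := by
  induction subs generalizing repl with
  | nil => exact h
  | cons s rest ih => exact ih _ (pvSweep_length names repl s h)

-- element i of B's swept array is the last-match fold at names[i]
theorem foldl_pvSweep_getElem (subs : List (List (String × String))) (names : List String) (repl : List (Option String))
    (h : repl.length = names.length) (i : ℕ) (hi : i < names.length) :
    (subs.foldl (pvSweep names) repl)[i]'(by rw [foldl_pvSweep_length subs names repl h]; exact hi)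
      = subs.foldl (pvLastStep (names[i]'hi)) (repl[i]'(by rw [h]; exact hi)) := by
  induction subs generalizing repl with
  | nil => rfl
  | cons s rest ih =>
    simp only [List.foldl_cons]
    rw [ih (pvSweep names repl s) (pvSweep_length names repl s h)]
    congr 1
    by_cases hc : ((PySem.Str.lower ((PySem.Dict.mk s).getD "original_ingredient" "") != "") && ((PySem.Dict.mk s).getD "replacement" "" != "")) = true
    · have hz : i < (names.zip repl).length := by
        rw [List.length_zip, h]; omega
      have hstep : pvSweep names repl s
          = (names.zip repl).map (fun p => if p.1 == PySem.Str.lower ((PySem.Dict.mk s).getD "original_ingredient" "") then some ((PySem.Dict.mk s).getD "replacement" "") else p.2) := by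
        simp [pvSweep, hc]
      have hone : i < names.length ⊓ repl.length := by
        rw [h]; omega
      rw [List.getElem_of_eq hstep]
      rw [List.getElem_map]
      rw [List.getElem_zip]
      simp only [Bool.and_eq_true, bne_iff_ne, ne_eq] at hc
      unfold pvLastStep
      by_cases he : (names[i]'hi) = PySem.Str.lower ((PySem.Dict.mk s).getD "original_ingredient" "")
      · simp [he, hc.1, hc.2]
      · have h1 : ((names[i]'hi) == PySem.Str.lower ((PySem.Dict.mk s).getD "original_ingredient" "")) = false := by simp [he]
        have h2 : (PySem.Str.lower ((PySem.Dict.mk s).getD "original_ingredient" "") == (names[i]'hi)) = false := by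
          rw [beq_eq_false_iff_ne]; exact fun hh => he hh.symm
        simp [h1, h2]
    · simp only [Bool.not_eq_true, Bool.and_eq_false_iff] at hc
      have hstep : pvSweep names repl s = repl := by
        unfold pvSweep
        rcases hc with hc | hc <;> simp [hc]
      rw [List.getElem_of_eq hstep]
      unfold pvLastStep
      rcases hc with hc | hc <;> simp [hc]

-- ===== VERDICT (by name: the statement is the Claim_ definition above) =====
theorem apply_substitutions_py_spec : Claim_equal_apply_substitutions_py := by
  intro ingredients substitutions _
  unfold Spec_apply_substitutions_py apply_substitutions_py apply_substitutions_py_alt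
  by_cases h : substitutions.isEmpty
  · simp [h]
  · rw [if_neg h, if_neg h]
    have hlen0 : (List.replicate ingredients.length (none : Option String)).length
        = (ingredients.map pvItemName).length := by simp
    apply List.ext_getElem
    · simp [foldl_pvSweep_length substitutions (ingredients.map pvItemName) _ hlen0]
    · intro i h1 h2
      have hi : i < ingredients.length := by simpa using h1
      have hin : i < (ingredients.map pvItemName).length := by simpa using hi
      have hz : i < (ingredients.zip ((ingredients.map pvItemName).zip
          (substitutions.foldl (pvSweep (ingredients.map pvItemName)) (List.replicate ingredients.length none)))).length := by
        simp [foldl_pvSweep_length substitutions (ingredients.map pvItemName) _ hlen0]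
        omega
      rw [List.getElem_map, List.getElem_map, List.getElem_zip, List.getElem_zip]
      simp only
      rw [foldl_pvSweep_getElem substitutions (ingredients.map pvItemName) _ hlen0 i hin]
      rw [List.getElem_replicate, List.getElem_map]
      rw [foldl_subStep_get?, PySem.Dict.get?_empty]
      cases List.foldl (pvLastStep (pvItemName (ingredients[i]'hi))) none substitutions <;> rfl
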